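-- pv_equiv track=rewrite | github.com/Hunterdii/GeeksforGeeks-POTD | July 2024 GFG SOLUTION/July-26.py | kPangram
-- ===== SOURCE A (Python) =====
-- def kPangram(string, k):
--     frequency = {}
--     for c in string:
--         if c.isalpha():
--             frequency[c] = frequency.get(c, 0) + 1
--
--     cnt = 0
--     uniq = 0
--     for key, value in frequency.items():
--         if key.isalpha():
--             cnt += value
--             uniq += 1
--
--     return cnt >= 26 and (26 - uniq) <= k
-- ===== SOURCE B (Python) =====
-- def kPangram(string, k):
--     total = 0
--     missing = 26
--     for L in 'abcdefghijklmnopqrstuvwxyzABCDEFGHIJKLMNOPQRSTUVWXYZ':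
--         c = string.count(L)
--         total += c
--         if c:
--             missing -= 1
--     return total >= 26 and missing <= k
-- ===== Notes on version B (the rewrite author's own statement) =====
-- stated objective: alternative
-- what changed: Instead of A's pass over the string building a per-letter frequency dict plus a second loop over the dict, B iterates over the fixed 52-letter ASCII alphabet and uses str.count per letter, accumulating the total letter count and decrementing a missing-letters counter.
import Mathlib
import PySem

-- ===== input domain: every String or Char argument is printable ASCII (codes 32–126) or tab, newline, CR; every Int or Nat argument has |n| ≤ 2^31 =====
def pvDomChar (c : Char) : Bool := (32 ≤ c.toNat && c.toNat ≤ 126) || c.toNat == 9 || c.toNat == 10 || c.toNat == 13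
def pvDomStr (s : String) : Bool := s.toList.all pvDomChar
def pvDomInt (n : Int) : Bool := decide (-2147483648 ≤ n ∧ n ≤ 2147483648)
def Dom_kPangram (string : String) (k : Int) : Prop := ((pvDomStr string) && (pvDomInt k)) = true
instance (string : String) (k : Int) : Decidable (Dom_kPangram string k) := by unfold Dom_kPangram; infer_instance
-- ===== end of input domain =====

-- B replaces A's frequency-dict pass over the string (plus a second loop over the
-- dict's items) by a loop over the fixed 52-letter ASCII alphabet using str.count
-- per letter; exact on the printable-ASCII domain stated by Dom_kPangram.


-- ===== PORT A =====
def kPangram (string : String) (k : Int) : Bool :=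
  let frequency : PySem.Dict Char Int :=
    string.toList.foldl
      (fun d c => if PySem.Chars.isalpha c then d.insert c (d.getD c 0 + 1) else d)
      PySem.Dict.empty
  let cu : Int × Int :=
    frequency.items.foldl
      (fun p kv => if PySem.Chars.isalpha kv.1 then (p.1 + kv.2, p.2 + 1) else p)
      (0, 0)
  decide (cu.1 ≥ 26) && decide (26 - cu.2 ≤ k)

-- ===== PORT B =====
-- the characters of B's alphabet string literal, in order
def pvAlphabet : List Char :=
  ['a','b','c','d','e','f','g','h','i','j','k','l','m','n','o','p','q','r','s','t','u','v','w','x','y','z',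
   'A','B','C','D','E','F','G','H','I','J','K','L','M','N','O','P','Q','R','S','T','U','V','W','X','Y','Z']

def kPangram_alt (string : String) (k : Int) : Bool :=
  let tm : Int × Int :=
    pvAlphabet.foldl
      (fun p L =>
        let c : Int := (PySem.Str.count string (String.ofList [L]) : Int)
        (p.1 + c, if c ≠ 0 then p.2 - 1 else p.2))
      (0, 26)
  decide (tm.1 ≥ 26) && decide (tm.2 ≤ k)

-- ===== PRECONDITION & SPEC =====
def Spec_kPangram (string : String) (k : Int) (out : Bool) : Prop := out = kPangram_alt string k
instance (string : String) (k : Int) (out : Bool) : Decidable (Spec_kPangram string k out) := by unfold Spec_kPangram; infer_instance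

-- ===== CLAIM (what is proved, stated in full; the proofs are below) =====
def Claim_equal_kPangram : Prop := ∀ (string : String) (k : Int), Dom_kPangram string k → Spec_kPangram string k (kPangram string k)

-- ===== LEMMAS AND PROOFS =====

-- Python's s.count(ch) for a single character is List.count.
theorem count_go_singleton (c : Char) (l : List Char) :
    ∀ (fuel acc : Nat), l.length ≤ fuel →
      PySem.Chars.count.go [c] fuel l acc = acc + l.count c := by
  induction l with
  | nil => intro fuel acc _; cases fuel <;> simp [PySem.Chars.count.go]
  | cons x t ih =>
    intro fuel acc hf
    cases fuel with
    | zero => simp at hf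
    | succ f =>
      simp only [PySem.Chars.count.go]
      by_cases hx : c = x
      · subst hx
        simp only [List.isPrefixOf, Bool.and_true, beq_self_eq_true,
          List.length_cons, List.drop_succ_cons, List.length_nil, List.drop_zero]
        rw [ih f (acc + 1) (by simpa using hf)]
        simp; omega
      · have hbeq : (c == x) = false := by simp [hx]
        simp only [List.isPrefixOf, hbeq, Bool.false_and, Bool.false_eq_true, if_false]
        rw [ih f acc (by simpa using hf)]
        have hsym : (x == c) = false := by simp; exact fun h => hx h.symm
        simp [List.count_cons, hsym]

theorem count_singleton (cs : List Char) (c : Char) :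
    PySem.Chars.count cs [c] = cs.count c := by
  simp [PySem.Chars.count, count_go_singleton c cs cs.length 0 le_rfl]

-- On the printable-ASCII domain, isalpha is membership in the 52-letter alphabet.
theorem isalpha_eq_contains (c : Char) (h : pvDomChar c = true) :
    PySem.Chars.isalpha c = pvAlphabet.contains c := by
  simp only [pvDomChar, Bool.or_eq_true, Bool.and_eq_true, decide_eq_true_eq, beq_iff_eq] at h
  have hofn : Char.ofNat c.toNat = c := Char.ofNat_toNat c
  have hb : c.toNat ≤ 126 := by omega
  rw [← hofn]
  interval_cases (c.toNat) <;> decide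

theorem pvAlphabet_nodup : pvAlphabet.Nodup := by decide

theorem isalpha_of_mem_pvAlphabet (c : Char) (h : c ∈ pvAlphabet) :
    PySem.Chars.isalpha c = true := by
  fin_cases h <;> decide

-- A loop that updates only when `p c` holds is the same loop over the filtered list.
theorem foldl_if_eq_foldl_filter {α β : Type} (p : α → Bool) (f : β → α → β)
    (xs : List α) (d0 : β) :
    xs.foldl (fun d c => if p c then f d c else d) d0 = (xs.filter p).foldl f d0 := by
  induction xs generalizing d0 with
  | nil => rfl
  | cons x xs ih =>
    simp only [List.foldl_cons, List.filter_cons]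
    by_cases h : p x = true <;> simp [h, ih]

-- A's second loop over pairs whose keys all satisfy the test sums the values and counts the items.
theorem foldl_pairs_all_true {κ : Type} (pred : κ → Bool) (l : List (κ × Int))
    (h : ∀ kv ∈ l, pred kv.1 = true) (a b : Int) :
    l.foldl (fun p kv => if pred kv.1 then (p.1 + kv.2, p.2 + 1) else p) (a, b)
      = (a + (l.map Prod.snd).sum, b + l.length) := by
  induction l generalizing a b with
  | nil => simp
  | cons kv l ih =>
    have hk : pred kv.1 = true := h kv (List.mem_cons_self ..)
    simp only [List.foldl_cons, hk, if_true]
    rw [ih (fun x hx => h x (List.mem_cons_of_mem _ hx))]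
    simp; constructor <;> ring

-- B's loop over the alphabet computes the total count and subtracts one per present letter.
theorem foldl_alphabet (al l : List Char) (a b : Int) :
    al.foldl
      (fun p L =>
        let c : Int := (l.count L : Int)
        (p.1 + c, if c ≠ 0 then p.2 - 1 else p.2))
      (a, b)
    = (a + ((al.map (fun L => (l.count L : Int))).sum),
       b - (al.countP (fun L => l.contains L) : Int)) := by
  induction al generalizing a b with
  | nil => simp
  | cons x t ih =>
    simp only [List.foldl_cons, List.map_cons, List.sum_cons, List.countP_cons, ih]
    refine Prod.ext ?_ ?_
    · simp; ring
    · by_cases hx : l.contains x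
      · have hc : (l.count x : Int) ≠ 0 := by
          have := List.count_pos_iff.mpr (List.contains_iff_mem.mp hx)
          omega
        have hm : x ∈ l := List.contains_iff_mem.mp hx
        have hne : l.count x ≠ 0 := by exact_mod_cast hc
        simp [hne, hm]; ring
      · have hm : x ∉ l := fun hmem => hx (List.contains_iff_mem.mpr hmem)
        have hz : l.count x = 0 := by rw [List.count_eq_zero]; exact hm
        simp [hz, hm]

-- a 0/1-sum over the alphabet is a countP
theorem sum_map_ite_eq_countP (al : List Char) (y : Char) :
    (al.map (fun L => if y == L then 1 else 0)).sum = al.countP (fun L => y == L) := by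
  induction al with
  | nil => rfl
  | cons z s ih =>
    simp only [List.map_cons, List.sum_cons, List.countP_cons, ih]
    by_cases hz : (y == z) = true <;> simp [hz] <;> try omega

theorem sum_map_add_nat (s : List Char) (f g : Char → Nat) :
    (s.map (fun L => f L + g L)).sum = (s.map f).sum + (s.map g).sum := by
  induction s with
  | nil => rfl
  | cons z u ih => simp only [List.map_cons, List.sum_cons, ih]; omega

theorem sum_count_cons (al : List Char) (y : Char) (t : List Char) :
    (al.map (fun L => (y :: t).count L)).sum
      = (al.map (fun L => t.count L)).sum + al.countP (fun L => y == L) := by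
  simp only [List.count_cons]
  rw [sum_map_add_nat al (fun L => t.count L) (fun L => if y == L then 1 else 0),
    sum_map_ite_eq_countP]

-- Summing, over a duplicate-free list of candidates, the occurrence counts in l
-- gives the number of elements of l that are candidates.
theorem sum_counts_nodup (al : List Char) (hal : al.Nodup) (l : List Char) :
    (al.map (fun L => l.count L)).sum = l.countP (fun x => al.contains x) := by
  induction l with
  | nil => simp
  | cons y t ih =>
    rw [sum_count_cons, ih, List.countP_cons]
    by_cases hy : y ∈ al
    · have h1 : al.countP (fun L => y == L) = 1 := by
        rw [show (fun L => y == L) = (· == y) from by funext L; simp [BEq.comm]]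
        exact List.count_eq_one_of_mem hal hy
      simp [h1, hy]
    · have h0 : al.countP (fun L => y == L) = 0 := by
        rw [List.countP_eq_zero]
        intro z hz hbeq
        exact hy ((beq_iff_eq.mp hbeq) ▸ hz)
      simp [h0, hy]

-- The number of candidates occurring in l is the number of distinct elements of l,
-- when every element of l is a candidate.
theorem countP_contains_eq_dedup_length (al l : List Char) (hal : al.Nodup)
    (hsub : ∀ x ∈ l, x ∈ al) :
    al.countP (fun L => l.contains L) = l.dedup.length := by
  rw [List.countP_eq_length_filter]
  have hperm : (al.filter (fun L => l.contains L)).Perm l.dedup := by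
    refine (List.perm_ext_iff_of_nodup (hal.filter _) l.nodup_dedup).mpr ?_
    intro x
    simp only [List.mem_filter, List.mem_dedup, List.contains_iff_mem]
    exact ⟨fun h => h.2, fun h => ⟨hsub x h, h⟩⟩
  exact hperm.length_eq

theorem setOfList_perm_dedup (l : List Char) :
    (PySem.Set.ofList l).Perm l.dedup := by
  refine (List.perm_ext_iff_of_nodup (PySem.Set.nodup_ofList l) l.nodup_dedup).mpr ?_
  intro x; rw [PySem.Set.mem_ofList, List.mem_dedup]

-- Summing the multiplicities of the distinct elements gives the length.
theorem sum_counts_ofList (l : List Char) :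
    ((PySem.Set.ofList l).map (fun x => l.count x)).sum = l.length := by
  calc ((PySem.Set.ofList l).map (fun x => l.count x)).sum
      = (l.dedup.map (fun x => l.count x)).sum := ((setOfList_perm_dedup l).map _).sum_eq
    _ = l.length := List.sum_map_count_dedup_eq_length l

-- ===== VERDICT (by name: the statement is the Claim_ definition above) =====
theorem kPangram_spec : Claim_equal_kPangram := by
  intro string k hdom
  have hdomc : ∀ c ∈ string.toList, pvDomChar c = true := by
    intro c hc
    have : pvDomStr string = true := by
      unfold Dom_kPangram at hdom; exact (Bool.and_eq_true ..).mp hdom |>.1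
    exact List.all_eq_true.mp this c hc
  unfold Spec_kPangram kPangram kPangram_alt
  simp only []
  set l := string.toList with hl
  set letters := l.filter PySem.Chars.isalpha with hlet
  -- A's first loop is the counter of the alphabetic characters
  have hfreq : l.foldl
      (fun d c => if PySem.Chars.isalpha c then d.insert c (d.getD c 0 + 1) else d)
      PySem.Dict.empty = PySem.Dict.counter letters := by
    rw [foldl_if_eq_foldl_filter, ← hlet,
      PySem.Dict.foldl_insert_getD_add_one_eq_counter]
  rw [hfreq, PySem.Dict.items_counter]
  have hall : ∀ kv ∈ (PySem.Set.ofList letters).map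
      (fun x => (x, (letters.count x : Int))), PySem.Chars.isalpha kv.1 = true := by
    intro kv hkv
    obtain ⟨x, hx, rfl⟩ := List.mem_map.mp hkv
    exact (List.mem_filter.mp ((PySem.Set.mem_ofList letters x).mp hx)).2
  rw [foldl_pairs_all_true _ _ hall]
  -- B's loop, with s.count(L) rewritten to List.count
  have hfun : (fun (p : Int × Int) (L : Char) =>
        let c : Int := (PySem.Str.count string (String.ofList [L]) : Int)
        (p.1 + c, if c ≠ 0 then p.2 - 1 else p.2))
      = (fun (p : Int × Int) (L : Char) =>
        let c : Int := (l.count L : Int)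
        (p.1 + c, if c ≠ 0 then p.2 - 1 else p.2)) := by
    funext p L
    simp only [PySem.Str.count_eq, String.toList_ofList, count_singleton, hl]
  rw [hfun, foldl_alphabet]
  -- the two totals agree
  have hsub : ∀ x ∈ letters, x ∈ pvAlphabet := by
    intro x hx
    have hd := hdomc x (List.mem_filter.mp hx).1
    have ha := (List.mem_filter.mp hx).2
    rw [isalpha_eq_contains x hd] at ha
    exact List.contains_iff_mem.mp ha
  have htotal : ((pvAlphabet.map (fun L => (l.count L : Int))).sum)
      = (letters.length : Int) := by
    have h1 : (pvAlphabet.map (fun L => l.count L)).sum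
        = l.countP (fun x => pvAlphabet.contains x) := sum_counts_nodup _ pvAlphabet_nodup l
    have h2 : l.countP (fun x => pvAlphabet.contains x) = l.countP PySem.Chars.isalpha := by
      apply List.countP_congr
      intro x hx
      rw [isalpha_eq_contains x (hdomc x hx)]
    calc (pvAlphabet.map (fun L => (l.count L : Int))).sum
        = ((pvAlphabet.map (fun L => l.count L)).map Nat.cast).sum := by rw [List.map_map]; rfl
      _ = ((pvAlphabet.map (fun L => l.count L)).sum : Int) := (Nat.cast_list_sum _).symm
      _ = (letters.length : Int) := by
          rw [h1, h2, hlet, ← List.countP_eq_length_filter]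
  -- the two distinct-letter counts agree
  have hdistinct : pvAlphabet.countP (fun L => l.contains L)
      = (PySem.Set.ofList letters).length := by
    have hcong : pvAlphabet.countP (fun L => l.contains L)
        = pvAlphabet.countP (fun L => letters.contains L) := by
      apply List.countP_congr
      intro L hL
      have ha : PySem.Chars.isalpha L = true := isalpha_of_mem_pvAlphabet L hL
      have hiff : L ∈ l ↔ L ∈ letters :=
        ⟨fun h => List.mem_filter.mpr ⟨h, ha⟩, fun h => (List.mem_filter.mp h).1⟩
      rw [Bool.eq_iff_iff]
      simp [hiff]
    rw [hcong, countP_contains_eq_dedup_length _ _ pvAlphabet_nodup hsub,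
      ← (setOfList_perm_dedup letters).length_eq]
  -- A's summed values are letters.length
  have hsumA : ((PySem.Set.ofList letters).map
      (fun x => ((letters.count x : Int)))).sum = (letters.length : Int) := by
    calc ((PySem.Set.ofList letters).map (fun x => ((letters.count x : Int)))).sum
        = (((PySem.Set.ofList letters).map (fun x => letters.count x)).map Nat.cast).sum := by
          rw [List.map_map]; rfl
      _ = (((PySem.Set.ofList letters).map (fun x => letters.count x)).sum : Int) :=
          (Nat.cast_list_sum _).symm
      _ = (letters.length : Int) := by rw [sum_counts_ofList letters]
  simp only [List.map_map, zero_add]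
  rw [show (Prod.snd ∘ fun x => (x, (letters.count x : Int)))
      = fun x => ((letters.count x : Int)) from rfl]
  rw [hsumA, List.length_map, htotal, hdistinct]
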